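-- pv_equiv track=rewrite | github.com/AngelDev2343/NavaScript | ide-desktop/navascript_ide.py | _closes_before_opens
-- ===== SOURCE A (Python) =====
-- def _closes_before_opens(line, depth):
--     d = depth; in_str = False; sq = ''
--     for c in line:
--         if in_str:
--             if c == sq: in_str = False
--             continue
--         if c in ('"', "'"):
--             in_str = True; sq = c; continue
--         if c == '}':
--             d -= 1
--             if d <= 0: return True
--         elif c == '{':
--             d += 1
--     return False
-- ===== SOURCE B (Python) =====
-- def _closes_before_opens(line, depth):
--     # Phase 1: drop quote characters and everything inside strings
--     # (same quote-toggle rule: a string starts at an unquoted ' or "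
--     # and ends only at the matching quote; no escape handling).
--     masked = []
--     quote = None
--     for c in line:
--         if quote is None:
--             if c == '"' or c == "'":
--                 quote = c
--             else:
--                 masked.append(c)
--         elif c == quote:
--             quote = None
--     # Phase 2: brace counting on the masked characters.
--     d = depth
--     for c in masked:
--         if c == '}':
--             d -= 1
--             if d <= 0:
--                 return True
--         elif c == '{':
--             d += 1
--     return False
-- ===== Notes on version B (the rewrite author's own statement) =====
-- stated objective: alternative
-- what changed: Replaces A's single interleaved scan (quote state machine and brace counter in one loop) with two separately-shaped passes: first build a masked character list with string contents and quotes removed, then count braces over that list.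
import Mathlib
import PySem

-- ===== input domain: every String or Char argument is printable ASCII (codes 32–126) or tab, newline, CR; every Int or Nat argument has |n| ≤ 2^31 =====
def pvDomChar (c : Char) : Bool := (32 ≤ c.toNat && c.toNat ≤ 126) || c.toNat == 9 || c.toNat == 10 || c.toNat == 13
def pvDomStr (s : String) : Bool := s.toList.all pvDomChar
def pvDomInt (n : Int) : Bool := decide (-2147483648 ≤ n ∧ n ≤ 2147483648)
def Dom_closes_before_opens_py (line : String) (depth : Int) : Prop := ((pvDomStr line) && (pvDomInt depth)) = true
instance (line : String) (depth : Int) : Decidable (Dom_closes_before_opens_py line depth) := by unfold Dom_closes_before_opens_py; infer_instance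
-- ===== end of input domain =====

-- B replaces A's single interleaved scan with two passes (mask string contents, then count braces); objective: alternative decomposition, same cost.


-- ===== PORT A =====
-- A's loop: state (d, in_str, sq); sq starts as Python's '' which is never
-- compared while in_str is false, so it is carried as a Char with dummy init ' '.
def cboLoopA : List Char → Int → Bool → Char → Bool
  | [], _, _, _ => false
  | c :: cs, d, in_str, sq =>
    if in_str then
      cboLoopA cs d (if c == sq then false else true) sq
    else if c == '"' || c == '\'' then
      cboLoopA cs d true c
    else if c == '}' then
      if d - 1 ≤ 0 then true else cboLoopA cs (d - 1) false sq
    else if c == '{' then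
      cboLoopA cs (d + 1) false sq
    else
      cboLoopA cs d false sq

def closes_before_opens_py (line : String) (depth : Int) : Bool :=
  cboLoopA line.toList depth false ' '

-- ===== PORT B =====
-- Phase 1: drop quote characters and everything inside strings.
def cboMask : List Char → Option Char → List Char
  | [], _ => []
  | c :: cs, none =>
    if c == '"' || c == '\'' then cboMask cs (some c) else c :: cboMask cs none
  | c :: cs, some q =>
    if c == q then cboMask cs none else cboMask cs (some q)

-- Phase 2: brace counting on the masked characters.
def cboCount : List Char → Int → Bool
  | [], _ => false
  | c :: cs, d =>
    if c == '}' then (if d - 1 ≤ 0 then true else cboCount cs (d - 1))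
    else if c == '{' then cboCount cs (d + 1)
    else cboCount cs d

def closes_before_opens_py_alt (line : String) (depth : Int) : Bool :=
  cboCount (cboMask line.toList none) depth

-- ===== PRECONDITION & SPEC =====
def Spec_closes_before_opens_py (line : String) (depth : Int) (out : Bool) : Prop := out = closes_before_opens_py_alt line depth
instance (line : String) (depth : Int) (out : Bool) : Decidable (Spec_closes_before_opens_py line depth out) := by unfold Spec_closes_before_opens_py; infer_instance

-- ===== CLAIM (what is proved, stated in full; the proofs are below) =====
def Claim_equal_closes_before_opens_py : Prop := ∀ (line : String) (depth : Int), Dom_closes_before_opens_py line depth → Spec_closes_before_opens_py line depth (closes_before_opens_py line depth)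

-- ===== LEMMAS AND PROOFS =====
-- Joint loop invariant: A's interleaved loop equals count-after-mask,
-- both in the in-string state (with any tracked quote) and outside it.
theorem cbo_key (cs : List Char) :
    (∀ (d : Int) (sq : Char), cboLoopA cs d true sq = cboCount (cboMask cs (some sq)) d) ∧
    (∀ (d : Int) (sq : Char), cboLoopA cs d false sq = cboCount (cboMask cs none) d) := by
  induction cs with
  | nil => simp [cboLoopA, cboMask, cboCount]
  | cons c cs ih =>
    refine ⟨fun d sq => ?_, fun d sq => ?_⟩
    · by_cases h : c = sq
      · simp [cboLoopA, cboMask, h, ih.2]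
      · simp [cboLoopA, cboMask, h, ih.1]
    · by_cases hq : c = '"' ∨ c = '\''
      · rcases hq with h | h <;> simp [cboLoopA, cboMask, h, ih.1]
      · push Not at hq
        by_cases hc : c = '}'
        · by_cases hd : d - 1 ≤ 0 <;>
            simp [cboLoopA, cboMask, cboCount, hc, hd, ih.2]
        · by_cases ho : c = '{' <;>
            simp [cboLoopA, cboMask, cboCount, hc, ho, hq.1, hq.2, ih.2]

-- ===== VERDICT (by name: the statement is the Claim_ definition above) =====
theorem closes_before_opens_py_spec : Claim_equal_closes_before_opens_py := by
  intro line depth _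
  exact (cbo_key line.toList).2 depth ' '
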